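-- pv_equiv track=rewrite | github.com/shirobou/kondate-calendar | deep_cleanse.py | plain_to_html_offset
-- ===== SOURCE A (Python) =====
-- def plain_to_html_offset(html_str, plain_offset):
--     plain_pos = 0
--     in_tag = False
--     for i, ch in enumerate(html_str):
--         if ch == '<':
--             in_tag = True
--             continue
--         if ch == '>':
--             in_tag = False
--             continue
--         if not in_tag:
--             if plain_pos >= plain_offset:
--                 return i
--             plain_pos += 1
--     return len(html_str)
-- ===== SOURCE B (Python) =====
-- def plain_to_html_offset(html_str, plain_offset):
--     offsets = []
--     in_tag = False
--     for i, ch in enumerate(html_str):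
--         if ch == '<':
--             in_tag = True
--         elif ch == '>':
--             in_tag = False
--         elif not in_tag:
--             offsets.append(i)
--     idx = max(plain_offset, 0)
--     return offsets[idx] if idx < len(offsets) else len(html_str)
-- ===== Notes on version B (the rewrite author's own statement) =====
-- stated objective: simpler
-- what changed: Replaces the short-circuiting scan (counter + early return mid-loop) with a build-then-index decomposition: one pass collects the HTML indices of visible characters, then the answer is a single clamped list lookup with len(html_str) as the out-of-range fallback.
import Mathlib
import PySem

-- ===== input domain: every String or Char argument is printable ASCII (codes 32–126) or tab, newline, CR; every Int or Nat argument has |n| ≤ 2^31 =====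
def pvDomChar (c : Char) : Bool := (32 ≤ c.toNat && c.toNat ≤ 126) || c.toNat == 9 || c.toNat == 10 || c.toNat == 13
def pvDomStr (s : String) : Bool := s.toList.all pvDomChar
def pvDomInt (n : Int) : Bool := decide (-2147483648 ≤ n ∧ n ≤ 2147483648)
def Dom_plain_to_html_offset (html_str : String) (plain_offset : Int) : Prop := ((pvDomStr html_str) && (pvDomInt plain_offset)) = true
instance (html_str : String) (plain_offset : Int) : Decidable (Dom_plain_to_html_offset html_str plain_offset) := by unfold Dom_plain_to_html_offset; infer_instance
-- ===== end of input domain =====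

-- B: build the list of visible-character indices once, then select by a clamped index — simpler decomposition, same O(n).
-- ===== PORT A =====
-- the for-loop of A: early return of i when plain_pos ≥ plain_offset at a visible char; falls through to len(html_str)
def pthoGoA (total : Int) (off : Int) : List Char → Int → Int → Bool → Int
  | [], _, _, _ => total
  | c :: cs, i, pos, tag =>
    if c = '<' then pthoGoA total off cs (i + 1) pos true
    else if c = '>' then pthoGoA total off cs (i + 1) pos false
    else if tag = false then
      (if pos ≥ off then i else pthoGoA total off cs (i + 1) (pos + 1) tag)
    else pthoGoA total off cs (i + 1) pos tag

def plain_to_html_offset (html_str : String) (plain_offset : Int) : Int :=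
  pthoGoA (PySem.Str.len html_str) plain_offset html_str.toList 0 0 false

-- ===== PORT B =====
-- the for-loop of B: collect the HTML indices of the visible characters
def pthoOffsets : List Char → Int → Bool → List Int
  | [], _, _ => []
  | c :: cs, i, tag =>
    if c = '<' then pthoOffsets cs (i + 1) true
    else if c = '>' then pthoOffsets cs (i + 1) false
    else if tag = false then i :: pthoOffsets cs (i + 1) tag
    else pthoOffsets cs (i + 1) tag

def plain_to_html_offset_alt (html_str : String) (plain_offset : Int) : Int :=
  let offsets := pthoOffsets html_str.toList 0 false
  let idx := max plain_offset 0
  if idx < (offsets.length : Int) then offsets.getD idx.toNat 0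
  else PySem.Str.len html_str

-- ===== PRECONDITION & SPEC =====
def Spec_plain_to_html_offset (html_str : String) (plain_offset : Int) (out : Int) : Prop := out = plain_to_html_offset_alt html_str plain_offset
instance (html_str : String) (plain_offset : Int) (out : Int) : Decidable (Spec_plain_to_html_offset html_str plain_offset out) := by unfold Spec_plain_to_html_offset; infer_instance

-- ===== CLAIM (what is proved, stated in full; the proofs are below) =====
def Claim_equal_plain_to_html_offset : Prop := ∀ (html_str : String) (plain_offset : Int), Dom_plain_to_html_offset html_str plain_offset → Spec_plain_to_html_offset html_str plain_offset (plain_to_html_offset html_str plain_offset)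

-- ===== LEMMAS AND PROOFS =====

-- ===== VERDICT (by name: the statement is the Claim_ definition above) =====
-- invariant: the remaining scan of A selects, from the offsets still to be collected,
-- the one at clamped position (off - pos), or total when out of range
theorem pthoGo_eq (total off : Int) : ∀ (cs : List Char) (i pos : Int) (tag : Bool),
    pthoGoA total off cs i pos tag =
      (if max (off - pos) 0 < ((pthoOffsets cs i tag).length : Int)
       then (pthoOffsets cs i tag).getD (max (off - pos) 0).toNat 0
       else total) := by
  intro cs
  induction cs with
  | nil => intro i pos tag; simp [pthoGoA, pthoOffsets]
  | cons c cs ih =>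
    intro i pos tag
    by_cases h1 : c = '<'
    · simp [pthoGoA, pthoOffsets, h1, ih]
    · by_cases h2 : c = '>'
      · simp [pthoGoA, pthoOffsets, h2, ih]
      · by_cases h3 : tag = false
        · by_cases h4 : pos ≥ off
          · have hm : max (off - pos) 0 = 0 := by omega
            simp [pthoGoA, pthoOffsets, h1, h2, h3, h4]
          · have hm : (max (off - (pos + 1)) 0).toNat + 1 = (max (off - pos) 0).toNat := by omega
            simp [pthoGoA, pthoOffsets, h1, h2, h3, h4, ih]
            rw [← hm]
            simp only [List.getElem?_cons_succ]
            split_ifs with ha hb <;> first | rfl | omega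
        · simp [pthoGoA, pthoOffsets, h1, h2, h3, ih]

theorem plain_to_html_offset_spec : Claim_equal_plain_to_html_offset := by
  intro html_str plain_offset _
  show plain_to_html_offset html_str plain_offset = plain_to_html_offset_alt html_str plain_offset
  rw [plain_to_html_offset, plain_to_html_offset_alt, pthoGo_eq]
  simp
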